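-- pv_equiv track=rewrite | github.com/leejin21/algProbSolve-PY | programmars/stack_que/stq_3.py | solution
-- ===== SOURCE A (Python) =====
-- from collections import Counter
--
-- def solution(progresses, speeds):
--     pr_max = 0
--     ans = [0]*len(progresses)
--     for i in range(len(progresses)):
--         remain = 100-progresses[i]; days = remain // speeds[i]
--         if remain % speeds[i] != 0:
--             days += 1
--         ans[i], pr_max = (pr_max, pr_max) if pr_max > days else (days, days)
--     return list(Counter(ans).values())
-- ===== SOURCE B (Python) =====
-- def solution(progresses, speeds):
--     out = []
--     cur = 0
--     for p, s in zip(progresses, speeds):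
--         remain = 100 - p
--         days = remain // s
--         if remain % s != 0:
--             days += 1
--         if out and days <= cur:
--             out[-1] += 1
--         else:
--             out.append(1)
--         if days > cur:
--             cur = days
--     return out
-- ===== Notes on version B (the rewrite author's own statement) =====
-- stated objective: simpler
-- what changed: B builds the list of group sizes directly in one pass over zip(progresses, speeds) with a running maximum (append a new group when the ceil-day count exceeds it, otherwise increment the last group), instead of A's two phases: filling an ans array with per-task release days and then tallying it with Counter.
import Mathlib
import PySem

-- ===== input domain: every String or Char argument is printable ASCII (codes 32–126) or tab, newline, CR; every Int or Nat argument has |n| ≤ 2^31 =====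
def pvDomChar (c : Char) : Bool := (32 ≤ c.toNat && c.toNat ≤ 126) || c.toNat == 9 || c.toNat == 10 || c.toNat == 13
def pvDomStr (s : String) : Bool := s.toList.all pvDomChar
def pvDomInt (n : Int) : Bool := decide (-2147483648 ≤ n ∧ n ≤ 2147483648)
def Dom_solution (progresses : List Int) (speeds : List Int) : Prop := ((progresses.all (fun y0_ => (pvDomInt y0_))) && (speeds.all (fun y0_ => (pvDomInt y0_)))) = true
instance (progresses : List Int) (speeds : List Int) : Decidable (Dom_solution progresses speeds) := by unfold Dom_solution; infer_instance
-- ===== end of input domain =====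

-- B builds the list of group sizes directly in one pass (running max + append/increment-last),
-- instead of A's two phases (fill an array of per-task day values, then tally it with Counter);
-- objective: simpler.

-- ===== PORT A =====
def solution (progresses : List Int) (speeds : List Int) : List Int :=
  let st :=
    (PySem.List.pyRange 0 (progresses.length : Int) 1).foldl
      (fun (st : List Int × Int) i =>
        let remain := 100 - PySem.List.pyGetD progresses i 0
        let s := PySem.List.pyGetD speeds i 0
        let days0 := PySem.Int.floordiv remain s
        let days := if PySem.Int.mod remain s ≠ 0 then days0 + 1 else days0
        let pr := if st.2 > days then (st.2, st.2) else (days, days)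
        -- ans[i] = pr.1 : i comes from range(len(progresses)), so 0 ≤ i < len(ans) and
        -- List.set at i.toNat is exactly Python's in-range item assignment
        (st.1.set i.toNat pr.1, pr.2))
      (List.replicate progresses.length 0, 0)
  (PySem.Dict.counter st.1).values

-- ===== PORT B =====
def solution_alt (progresses : List Int) (speeds : List Int) : List Int :=
  ((progresses.zip speeds).foldl
    (fun (st : List Int × Int) ps =>
      let remain := 100 - ps.1
      let days0 := PySem.Int.floordiv remain ps.2
      let days := if PySem.Int.mod remain ps.2 ≠ 0 then days0 + 1 else days0
      -- out[-1] += 1 on a non-empty out is dropLast ++ [last + 1]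
      let out := if st.1 ≠ [] ∧ days ≤ st.2
        then st.1.dropLast ++ [st.1.getLastD 0 + 1]
        else st.1 ++ [1]
      (out, if days > st.2 then days else st.2))
    ([], 0)).1

-- ===== PRECONDITION & SPEC =====
-- Pre_ excludes exactly the inputs where the Python A raises: an IndexError when speeds is
-- shorter than progresses, and a ZeroDivisionError when a used speed is 0.
def Pre_solution (progresses : List Int) (speeds : List Int) : Prop :=
  progresses.length ≤ speeds.length ∧ ∀ s ∈ speeds.take progresses.length, s ≠ 0
instance (progresses : List Int) (speeds : List Int) : Decidable (Pre_solution progresses speeds) := by unfold Pre_solution; infer_instance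
def pvWitness_solution : List Int × List Int := ([93, 30, 55], [1, 30, 5])
def Spec_solution (progresses : List Int) (speeds : List Int) (out : List Int) : Prop := out = solution_alt progresses speeds
instance (progresses : List Int) (speeds : List Int) (out : List Int) : Decidable (Spec_solution progresses speeds out) := by unfold Spec_solution; infer_instance

-- ===== CLAIM (what is proved, stated in full; the proofs are below) =====
def Claim_equal_solution : Prop := ∀ (progresses : List Int) (speeds : List Int), Dom_solution progresses speeds → Pre_solution progresses speeds → Spec_solution progresses speeds (solution progresses speeds)

-- ===== LEMMAS AND PROOFS =====

def pvDays (p s : Int) : Int :=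
  let d0 := PySem.Int.floordiv (100 - p) s
  if PySem.Int.mod (100 - p) s ≠ 0 then d0 + 1 else d0

def pvVals (m : Int) : List (Int × Int) → List Int
  | [] => []
  | ps :: t =>
    (if m > pvDays ps.1 ps.2 then m else pvDays ps.1 ps.2) ::
      pvVals (if m > pvDays ps.1 ps.2 then m else pvDays ps.1 ps.2) t

def pvG (m : Int) : List (Int × Int) → Nat × List Int
  | [] => (0, [])
  | ps :: t =>
    if pvDays ps.1 ps.2 ≤ m then ((pvG m t).1 + 1, (pvG m t).2)
    else (0, (((pvG (pvDays ps.1 ps.2) t).1 + 1 : Nat) : Int) :: (pvG (pvDays ps.1 ps.2) t).2)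

def pvF (l : List Int) : List Int :=
  (PySem.Set.ofList l).map (fun k => (l.count k : Int))

theorem pvVals_ge (t : List (Int × Int)) : ∀ m, ∀ x ∈ pvVals m t, m ≤ x := by
  induction t with
  | nil => intro m x hx; simp [pvVals] at hx
  | cons ps t ih =>
    intro m x hx
    simp only [pvVals, List.mem_cons] at hx
    rcases hx with h | h
    · subst h; split <;> omega
    · have := ih _ x h; split at this <;> omega

theorem pvF_cons (v : Int) (L : List Int) :
    pvF (v :: L) = ((L.count v : Int) + 1) :: ((PySem.Set.ofList L).discard v).map (fun k => (L.count k : Int)) := by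
  unfold pvF
  rw [PySem.Set.ofList_cons]
  simp only [List.map_cons, List.count_cons_self]
  refine List.cons_eq_cons.mpr ⟨by push_cast; ring, ?_⟩
  refine List.map_congr_left (fun k hk => ?_)
  have hne : k ≠ v := ((PySem.Set.mem_discard _ _ _).1 hk).2
  simp [List.count_cons]; exact fun h => hne h.symm

theorem pvF_cons_notmem (v : Int) (L : List Int) (h : v ∉ L) : pvF (v :: L) = 1 :: pvF L := by
  rw [pvF_cons]
  have hd : (PySem.Set.ofList L).discard v = PySem.Set.ofList L := by
    simp [PySem.Set.discard]
    exact fun a ha => ne_of_mem_of_not_mem ha h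
  rw [hd, List.count_eq_zero_of_not_mem h]
  simp [pvF]

theorem pvF_cons_dup (v : Int) (L : List Int) :
    pvF (v :: v :: L) = ((L.count v : Int) + 2) :: ((PySem.Set.ofList L).discard v).map (fun k => (L.count k : Int)) := by
  rw [pvF_cons]
  rw [PySem.Set.ofList_cons]
  have hdd : PySem.Set.discard (v :: PySem.Set.discard (PySem.Set.ofList L) v) v
      = PySem.Set.discard (PySem.Set.ofList L) v := by
    simp [PySem.Set.discard, List.filter_filter]
  rw [hdd, List.count_cons_self]
  refine List.cons_eq_cons.mpr ⟨by push_cast; ring, ?_⟩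
  refine List.map_congr_left (fun k hk => ?_)
  have hne : k ≠ v := ((PySem.Set.mem_discard _ _ _).1 hk).2
  simp [List.count_cons]; exact fun h => hne h.symm

theorem pvF_vals (t : List (Int × Int)) : ∀ v : Int,
    pvF (v :: pvVals v t) = (((pvG v t).1 : Int) + 1) :: (pvG v t).2 := by
  induction t with
  | nil => intro v; simp [pvVals, pvG, pvF, PySem.Set.ofList_cons, PySem.Set.ofList_nil, PySem.Set.discard]
  | cons ps t ih =>
    intro v
    by_cases h : pvDays ps.1 ps.2 ≤ v
    · -- joins the open group: value v again
      have hv : (if v > pvDays ps.1 ps.2 then v else pvDays ps.1 ps.2) = v := by split <;> omega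
      have hvals : pvVals v (ps :: t) = v :: pvVals v t := by simp only [pvVals, hv]
      have hG : pvG v (ps :: t) = ((pvG v t).1 + 1, (pvG v t).2) := by simp [pvG, h]
      rw [hvals, hG]
      have hIH := ih v
      rw [pvF_cons] at hIH
      rw [pvF_cons_dup]
      have h1 := (List.cons_eq_cons.mp hIH).1
      have h2 := (List.cons_eq_cons.mp hIH).2
      refine List.cons_eq_cons.mpr ⟨by push_cast at h1 ⊢; omega, h2⟩
    · -- a new group with value d > v
      have hd : v < pvDays ps.1 ps.2 := by omega
      have hv : (if v > pvDays ps.1 ps.2 then v else pvDays ps.1 ps.2) = pvDays ps.1 ps.2 := by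
        split <;> omega
      have hvals : pvVals v (ps :: t) = pvDays ps.1 ps.2 :: pvVals (pvDays ps.1 ps.2) t := by
        simp only [pvVals, hv]
      have hG : pvG v (ps :: t)
          = (0, (((pvG (pvDays ps.1 ps.2) t).1 + 1 : Nat) : Int) :: (pvG (pvDays ps.1 ps.2) t).2) := by
        simp [pvG, h]
      rw [hvals, hG]
      have hnm : v ∉ pvDays ps.1 ps.2 :: pvVals (pvDays ps.1 ps.2) t := by
        intro hmem
        rcases List.mem_cons.mp hmem with h' | h'
        · omega
        · have := pvVals_ge t (pvDays ps.1 ps.2) v h'; omega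
      rw [pvF_cons_notmem _ _ hnm, ih (pvDays ps.1 ps.2)]
      push_cast
      simp

theorem pvB_step (ps : Int × Int) (m : Int) (pre : List Int) (last : Int) :
    (let remain := 100 - ps.1;
     let days0 := PySem.Int.floordiv remain ps.2;
     let days := if PySem.Int.mod remain ps.2 ≠ 0 then days0 + 1 else days0;
     let out :=
       if (pre ++ [last], m).1 ≠ [] ∧ days ≤ (pre ++ [last], m).2 then
         (pre ++ [last], m).1.dropLast ++ [(pre ++ [last], m).1.getLastD 0 + 1]
       else (pre ++ [last], m).1 ++ [1];
     (out, if days > (pre ++ [last], m).2 then days else (pre ++ [last], m).2))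
    = if pvDays ps.1 ps.2 ≤ m then (pre ++ [last + 1], m)
      else ((pre ++ [last]) ++ [1], pvDays ps.1 ps.2) := by
  show
    (if pre ++ [last] ≠ [] ∧ pvDays ps.1 ps.2 ≤ m
      then (pre ++ [last]).dropLast ++ [(pre ++ [last]).getLastD 0 + 1]
      else (pre ++ [last]) ++ [1],
     if pvDays ps.1 ps.2 > m then pvDays ps.1 ps.2 else m) = _
  by_cases h : pvDays ps.1 ps.2 ≤ m
  · rw [if_pos h, if_pos ⟨by simp, h⟩, if_neg (by omega)]
    simp
  · rw [if_neg h, if_neg (by tauto), if_pos (by omega)]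

theorem pvB_loop (t : List (Int × Int)) : ∀ (m : Int) (pre : List Int) (last : Int),
    (t.foldl
      (fun (st : List Int × Int) ps =>
        let remain := 100 - ps.1
        let days0 := PySem.Int.floordiv remain ps.2
        let days := if PySem.Int.mod remain ps.2 ≠ 0 then days0 + 1 else days0
        let out := if st.1 ≠ [] ∧ days ≤ st.2
          then st.1.dropLast ++ [st.1.getLastD 0 + 1]
          else st.1 ++ [1]
        (out, if days > st.2 then days else st.2))
      (pre ++ [last], m)).1 = pre ++ (last + ((pvG m t).1 : Int)) :: (pvG m t).2 := by
  induction t with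
  | nil => intro m pre last; simp [pvG]
  | cons ps t ih =>
    intro m pre last
    rw [List.foldl_cons, pvB_step]
    by_cases h : pvDays ps.1 ps.2 ≤ m
    · rw [if_pos h, ih]
      have hG : pvG m (ps :: t) = ((pvG m t).1 + 1, (pvG m t).2) := by simp [pvG, h]
      rw [hG]
      refine congrArg (pre ++ ·) (List.cons_eq_cons.mpr ⟨by push_cast; ring, rfl⟩)
    · rw [if_neg h, ih]
      have hG : pvG m (ps :: t)
          = (0, (((pvG (pvDays ps.1 ps.2) t).1 + 1 : Nat) : Int) :: (pvG (pvDays ps.1 ps.2) t).2) := by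
        simp [pvG, h]
      rw [hG]
      simp only [List.append_assoc, List.cons_append, List.nil_append]
      refine congrArg (pre ++ ·) ?_
      refine List.cons_eq_cons.mpr ⟨by omega, List.cons_eq_cons.mpr ⟨by push_cast; ring, rfl⟩⟩

theorem take_set_succ (l : List Int) (j : Nat) (v : Int) (h : j < l.length) :
    (l.set j v).take (j+1) = l.take j ++ [v] := by
  rw [List.take_add_one, List.take_set]
  have h2 : (l.set j v)[j]? = some v := by simp [h]
  rw [h2]
  have h3 : (List.take j l).set j v = List.take j l :=
    List.set_eq_of_length_le (by simp)
  simp [h3]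

theorem pvA_step (p s : Int) (acc : List Int) (m : Int) (j : Nat) :
    (let remain := 100 - p
     let s' := s
     let days0 := PySem.Int.floordiv remain s'
     let days := if PySem.Int.mod remain s' ≠ 0 then days0 + 1 else days0
     let prx := if (acc, m).2 > days then ((acc, m).2, (acc, m).2) else (days, days)
     ((acc, m).1.set j prx.1, prx.2))
    = (acc.set j (if m > pvDays p s then m else pvDays p s),
       if m > pvDays p s then m else pvDays p s) := by
  simp only [pvDays]
  split <;> split <;> rfl

theorem pvA_loop (pr sp : List Int) (hlen : pr.length ≤ sp.length) :
    ∀ (c j : Nat) (acc : List Int) (m : Int), j + c = pr.length → acc.length = pr.length →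
    ((PySem.List.pyRange (j : Int) (pr.length : Int) 1).foldl
      (fun (st : List Int × Int) i =>
        let remain := 100 - PySem.List.pyGetD pr i 0
        let s := PySem.List.pyGetD sp i 0
        let days0 := PySem.Int.floordiv remain s
        let days := if PySem.Int.mod remain s ≠ 0 then days0 + 1 else days0
        let prx := if st.2 > days then (st.2, st.2) else (days, days)
        (st.1.set i.toNat prx.1, prx.2))
      (acc, m)).1 = acc.take j ++ pvVals m ((pr.drop j).zip (sp.drop j)) := by
  intro c
  induction c with
  | zero =>
    intro j acc m hj hl
    rw [PySem.List.pyRange_one_eq_nil (by omega)]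
    have hdj : pr.drop j = [] := List.drop_eq_nil_of_le (by omega)
    have ht : acc.take j = acc := List.take_of_length_le (by omega)
    simp [hdj, pvVals, ht]
  | succ c ihc =>
    intro j acc m hj hl
    have hjlt : j < pr.length := by omega
    have hjs : j < sp.length := by omega
    rw [PySem.List.pyRange_one_cons (by exact_mod_cast hjlt), List.foldl_cons,
        PySem.List.pyGetD_natCast pr j 0, PySem.List.pyGetD_natCast sp j 0,
        Int.toNat_natCast, pvA_step]
    rw [show ((j : Int) + 1) = ((j + 1 : Nat) : Int) by push_cast; ring]
    rw [ihc (j+1) _ _ (by omega) (by simp [hl])]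
    rw [take_set_succ acc j _ (by omega)]
    rw [List.drop_eq_getElem_cons hjlt, List.drop_eq_getElem_cons hjs, List.zip_cons_cons]
    rw [List.getD_eq_getElem pr 0 hjlt, List.getD_eq_getElem sp 0 hjs]
    simp [pvVals]

theorem values_counter_eq_pvF (l : List Int) : (PySem.Dict.counter l).values = pvF l := by
  show (PySem.Dict.counter l).items.map (·.2) = _
  rw [PySem.Dict.items_counter]
  simp [pvF]

theorem pvA_total (pr sp : List Int) (hlen : pr.length ≤ sp.length) :
    ((PySem.List.pyRange 0 (pr.length : Int) 1).foldl
      (fun (st : List Int × Int) i =>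
        let remain := 100 - PySem.List.pyGetD pr i 0
        let s := PySem.List.pyGetD sp i 0
        let days0 := PySem.Int.floordiv remain s
        let days := if PySem.Int.mod remain s ≠ 0 then days0 + 1 else days0
        let prx := if st.2 > days then (st.2, st.2) else (days, days)
        (st.1.set i.toNat prx.1, prx.2))
      (List.replicate pr.length 0, 0)).1 = pvVals 0 (pr.zip sp) := by
  have h := pvA_loop pr sp hlen pr.length 0 (List.replicate pr.length 0) 0 (by omega) (by simp)
  simp only [Int.natCast_zero, List.take_zero, List.nil_append, List.drop_zero] at h
  exact h

-- ===== VERDICT (by name: the statement is the Claim_ definition above) =====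
theorem solution_spec : Claim_equal_solution := by
  intro pr sp _ hpre
  unfold Spec_solution
  obtain ⟨hlen, -⟩ := hpre
  show solution pr sp = solution_alt pr sp
  unfold solution solution_alt
  show (PySem.Dict.counter
      ((PySem.List.pyRange 0 (pr.length : Int) 1).foldl
        (fun (st : List Int × Int) i =>
          let remain := 100 - PySem.List.pyGetD pr i 0
          let s := PySem.List.pyGetD sp i 0
          let days0 := PySem.Int.floordiv remain s
          let days := if PySem.Int.mod remain s ≠ 0 then days0 + 1 else days0
          let prx := if st.2 > days then (st.2, st.2) else (days, days)
          (st.1.set i.toNat prx.1, prx.2))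
        (List.replicate pr.length 0, 0)).1).values = _
  rw [pvA_total pr sp hlen, values_counter_eq_pvF]
  cases pr with
  | nil => simp [pvVals, pvF]
  | cons p pr' =>
    cases sp with
    | nil => simp at hlen
    | cons s sp' =>
      rw [List.zip_cons_cons, List.foldl_cons]
      have hstep0 :
        (let remain := 100 - (p, s).1
         let days0 := PySem.Int.floordiv remain (p, s).2
         let days := if PySem.Int.mod remain (p, s).2 ≠ 0 then days0 + 1 else days0
         let out := if (([], 0) : List Int × Int).1 ≠ [] ∧ days ≤ (([], 0) : List Int × Int).2
           then (([], 0) : List Int × Int).1.dropLast ++ [(([], 0) : List Int × Int).1.getLastD 0 + 1]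
           else (([], 0) : List Int × Int).1 ++ [1]
         (out, if days > (([], 0) : List Int × Int).2 then days else (([], 0) : List Int × Int).2))
        = (([] : List Int) ++ [1], if 0 > pvDays p s then 0 else pvDays p s) := by
        show
          (if (([] : List Int) ≠ [] ∧ pvDays p s ≤ 0)
            then ([] : List Int).dropLast ++ [([] : List Int).getLastD 0 + 1]
            else ([] : List Int) ++ [1],
           if pvDays p s > 0 then pvDays p s else 0) = _
        rw [if_neg (by simp)]
        refine Prod.ext rfl ?_
        show (if pvDays p s > 0 then pvDays p s else 0) = _
        split_ifs <;> omega
      rw [hstep0, pvB_loop (pr'.zip sp') (if 0 > pvDays p s then 0 else pvDays p s) [] 1]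
      have hv : pvVals 0 ((p, s) :: pr'.zip sp')
          = (if 0 > pvDays p s then 0 else pvDays p s)
            :: pvVals (if 0 > pvDays p s then 0 else pvDays p s) (pr'.zip sp') := rfl
      rw [hv, pvF_vals]
      simp only [List.nil_append]
      refine List.cons_eq_cons.mpr ⟨by ring, rfl⟩
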